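-- pv_equiv track=rewrite | github.com/Ace1928/eidosian_forge | archive_forge/code/func_changelog_entries.py | changelog_entries
-- ===== SOURCE A (Python) =====
-- def changelog_entries(lines):
--     """Return a list of changelog entries.
--
--     :param lines: lines of a changelog file.
--     :returns: list of entries.  Each entry is a tuple of lines.
--     """
--     entries = []
--     for line in lines:
--         if line[0] not in (' ', '\t', '\n'):
--             entries.append([line])
--         else:
--             try:
--                 entry = entries[-1]
--             except IndexError:
--                 entries.append([])
--                 entry = entries[-1]
--             entry.append(line)
--     return list(map(tuple, entries))
-- ===== SOURCE B (Python) =====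
-- def changelog_entries(lines):
--     """Return a list of changelog entries.
--
--     :param lines: lines of a changelog file.
--     :returns: list of entries.  Each entry is a tuple of lines.
--     """
--     groups = []
--     current = []
--     for line in reversed(lines):
--         current.append(line)
--         if line[0] not in (' ', '\t', '\n'):
--             groups.append(tuple(reversed(current)))
--             current = []
--     if current:
--         groups.append(tuple(reversed(current)))
--     return groups[::-1]
-- ===== Notes on version B (the rewrite author's own statement) =====
-- stated objective: alternative
-- what changed: B makes a single reverse pass that emits a completed entry each time it reaches a header line (building the output back-to-front), instead of A's forward pass that appends every indented line onto the mutable last entry.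
import Mathlib
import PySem

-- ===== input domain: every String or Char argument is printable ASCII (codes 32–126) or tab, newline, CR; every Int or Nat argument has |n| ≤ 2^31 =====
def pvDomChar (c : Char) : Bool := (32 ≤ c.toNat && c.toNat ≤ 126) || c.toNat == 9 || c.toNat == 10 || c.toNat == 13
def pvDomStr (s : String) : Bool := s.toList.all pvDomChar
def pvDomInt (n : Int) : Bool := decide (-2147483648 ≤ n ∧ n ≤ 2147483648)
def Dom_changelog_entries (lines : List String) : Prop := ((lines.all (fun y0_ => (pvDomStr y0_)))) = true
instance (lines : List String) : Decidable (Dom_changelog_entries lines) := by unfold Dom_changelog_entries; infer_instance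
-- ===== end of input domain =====

-- B replaces A's forward pass (which appends indented lines onto the mutable last entry)
-- with a single reverse pass that closes an entry at each header line; return values only.

-- ===== PORT A =====
-- line[0] not in (' ', '\t', '\n'); Pre_ guarantees line is nonempty, so the get succeeds
def pvIsHdrA (line : String) : Bool :=
  match PySem.Str.pyGet? line 0 with
  | some c => !(c == ' ' || c == '\t' || c == '\n')
  | none => false

-- one iteration of A's for-loop over `entries`
def pvAStep (entries : List (List String)) (line : String) : List (List String) :=
  if pvIsHdrA line then
    entries ++ [[line]]
  else
    match entries.getLast? with
    | some entry => entries.dropLast ++ [entry ++ [line]]   -- entry = entries[-1]; entry.append(line)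
    | none => entries ++ [[line]]                           -- IndexError path: entries.append([]); entry.append(line)

def changelog_entries (lines : List String) : List (List String) :=
  lines.foldl pvAStep []

-- ===== PORT B =====
def pvIsHdrB (line : String) : Bool :=
  match PySem.Str.pyGet? line 0 with
  | some c => !(c == ' ' || c == '\t' || c == '\n')
  | none => false

-- one iteration of B's for-loop over reversed(lines); state is (groups, current)
def pvBStep (st : List (List String) × List String) (line : String) : List (List String) × List String :=
  let current := st.2 ++ [line]
  if pvIsHdrB line then (st.1 ++ [current.reverse], []) else (st.1, current)

def changelog_entries_alt (lines : List String) : List (List String) :=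
  let st := lines.reverse.foldl pvBStep ([], [])
  let groups := if st.2 = [] then st.1 else st.1 ++ [st.2.reverse]
  groups.reverse

-- ===== PRECONDITION & SPEC =====
-- Pre_ excludes inputs containing an empty line: there `line[0]` raises IndexError in A (and in B).
def Pre_changelog_entries (lines : List String) : Prop := ∀ l ∈ lines, l ≠ ""
instance (lines : List String) : Decidable (Pre_changelog_entries lines) := by
  unfold Pre_changelog_entries; infer_instance
def pvWitness_changelog_entries : List String := ["v1.0", "  fixed a bug", "\tnotes", "v0.9"]

def Spec_changelog_entries (lines : List String) (out : List (List String)) : Prop := out = changelog_entries_alt lines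
instance (lines : List String) (out : List (List String)) : Decidable (Spec_changelog_entries lines out) := by unfold Spec_changelog_entries; infer_instance

-- ===== CLAIM (what is proved, stated in full; the proofs are below) =====
def Claim_equal_changelog_entries : Prop := ∀ (lines : List String), Dom_changelog_entries lines → Pre_changelog_entries lines → Spec_changelog_entries lines (changelog_entries lines)

-- ===== LEMMAS AND PROOFS =====

-- canonical recursive grouping both ports are proved equal to
def pvChunk (lines : List String) : List (List String) :=
  match lines with
  | [] => []
  | l :: ls =>
      (l :: ls.takeWhile (fun x => !pvIsHdrA x)) :: pvChunk (ls.dropWhile (fun x => !pvIsHdrA x))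
termination_by lines.length
decreasing_by
  have := List.length_dropWhile_le (fun x => !pvIsHdrA x) ls
  simp; omega

lemma pvChunk_nil : pvChunk [] = [] := by rw [pvChunk]

lemma pvChunk_cons (l : String) (ls : List String) :
    pvChunk (l :: ls)
      = (l :: ls.takeWhile (fun x => !pvIsHdrA x)) :: pvChunk (ls.dropWhile (fun x => !pvIsHdrA x)) := by
  rw [pvChunk]

lemma pvAStep_nil (l : String) : pvAStep [] l = [[l]] := by
  unfold pvAStep; split <;> rfl

lemma pvFoldA (ls : List String) : ∀ (pre : List (List String)) (cur : List String),
    List.foldl pvAStep (pre ++ [cur]) ls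
      = pre ++ (cur ++ ls.takeWhile (fun x => !pvIsHdrA x))
          :: pvChunk (ls.dropWhile (fun x => !pvIsHdrA x)) := by
  induction ls with
  | nil => intro pre cur; simp [pvChunk_nil]
  | cons l ls ih =>
      intro pre cur
      by_cases h : pvIsHdrA l
      · have : pvAStep (pre ++ [cur]) l = (pre ++ [cur]) ++ [[l]] := by
          simp [pvAStep, h]
        simp only [List.foldl_cons, this]
        rw [ih (pre ++ [cur]) [l]]
        simp [List.takeWhile, List.dropWhile, h, pvChunk_cons]
      · have : pvAStep (pre ++ [cur]) l = pre ++ [cur ++ [l]] := by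
          simp [pvAStep, h]
        simp only [List.foldl_cons, this]
        rw [ih pre (cur ++ [l])]
        simp [List.takeWhile, List.dropWhile, h]

lemma pvA_eq_chunk (lines : List String) : changelog_entries lines = pvChunk lines := by
  cases lines with
  | nil => simp [changelog_entries, pvChunk_nil]
  | cons l ls =>
      unfold changelog_entries
      rw [List.foldl_cons, pvAStep_nil]
      have := pvFoldA ls ([] : List (List String)) [l]
      simpa [pvChunk_cons] using this

lemma pvFoldB (ls : List String) :
    List.foldl pvBStep ([], []) ls.reverse
      = ((pvChunk (ls.dropWhile (fun x => !pvIsHdrA x))).reverse,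
         (ls.takeWhile (fun x => !pvIsHdrA x)).reverse) := by
  induction ls with
  | nil => simp [pvChunk_nil]
  | cons l ls ih =>
      rw [List.reverse_cons, List.foldl_concat, ih]
      by_cases h : pvIsHdrA l
      · have hB : pvIsHdrB l = true := h
        simp [pvBStep, hB, List.takeWhile, List.dropWhile, h, pvChunk_cons]
      · have hB : pvIsHdrB l = false := by simpa [pvIsHdrB, pvIsHdrA] using h
        simp [pvBStep, hB, List.takeWhile, List.dropWhile, h]

lemma pvB_eq_chunk (lines : List String) : changelog_entries_alt lines = pvChunk lines := by
  unfold changelog_entries_alt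
  rw [pvFoldB]
  cases lines with
  | nil => simp [pvChunk_nil]
  | cons l ls =>
      by_cases h : pvIsHdrA l
      · simp [List.takeWhile, List.dropWhile, h, pvChunk_cons]
      · simp [List.takeWhile, List.dropWhile, h, pvChunk_cons]

-- ===== VERDICT (by name: the statement is the Claim_ definition above) =====
theorem changelog_entries_spec : Claim_equal_changelog_entries := by
  intro lines _ _
  unfold Spec_changelog_entries
  rw [pvA_eq_chunk, pvB_eq_chunk]
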